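-- pv_equiv track=rewrite | github.com/pkacprzak5/graph-aglorithms | lab1/zad1.py | bfs
-- ===== SOURCE A (Python) =====
-- from queue import PriorityQueue, Queue
--
-- s = 1
--
-- t = 2
--
-- def bfs(G, V, limit):
--     q = Queue()
--     q.put(s)
--     visited = [False for _ in range(V+1)]
--     visited[1] = True
--     while not q.empty():
--         v = q.get()
--         if v == t:
--             return True
--         for u, weight in G[v]:
--             weight *= (-1)
--             if weight >= limit and not visited[u]:
--                 q.put(u)
--                 visited[u] = True
--
--     return False
-- ===== SOURCE B (Python) =====
-- s = 1
--
-- t = 2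
--
-- def bfs(G, V, limit):
--     visited = [False for _ in range(V+1)]
--     visited[1] = True
--
--     def dfs(v):
--         if v == t:
--             return True
--         for u, weight in G[v]:
--             if -weight >= limit and not visited[u]:
--                 visited[u] = True
--                 if dfs(u):
--                     return True
--         return False
--
--     return dfs(s)
-- ===== Notes on version B (the rewrite author's own statement) =====
-- stated objective: alternative
-- what changed: The Queue-based iterative BFS loop is replaced by a recursive DFS helper over the same visited array: no queue object, the target test moves to the entry of the recursion, and each discovered vertex is explored to exhaustion before its siblings.
import Mathlib
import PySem

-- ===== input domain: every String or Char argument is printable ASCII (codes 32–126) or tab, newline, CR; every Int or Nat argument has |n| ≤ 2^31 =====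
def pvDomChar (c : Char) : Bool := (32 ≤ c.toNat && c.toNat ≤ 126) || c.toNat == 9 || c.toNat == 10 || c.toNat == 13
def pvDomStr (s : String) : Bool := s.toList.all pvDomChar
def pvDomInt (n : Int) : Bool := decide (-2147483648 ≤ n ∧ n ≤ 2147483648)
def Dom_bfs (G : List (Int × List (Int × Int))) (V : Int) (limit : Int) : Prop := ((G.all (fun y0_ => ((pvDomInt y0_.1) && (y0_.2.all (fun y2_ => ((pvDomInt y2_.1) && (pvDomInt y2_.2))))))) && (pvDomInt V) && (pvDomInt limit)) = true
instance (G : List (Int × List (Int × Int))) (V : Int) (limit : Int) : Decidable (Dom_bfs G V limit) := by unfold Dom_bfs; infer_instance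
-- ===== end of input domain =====

-- B replaces the Queue-based BFS loop by a recursive DFS helper over the same visited
-- array (objective: alternative, same cost); equivalence is proved on Pre_bfs.

-- ===== PORT A =====
-- Port of A (the Python module's globals s = 1, t = 2 are inlined as the literals 1 and 2).
-- G[v]: first-match association-list lookup; `none` is Python's KeyError, excluded by
-- Pre_bfs, so the `.getD []` default is never taken on admitted inputs.
def gAdj (G : List (Int × List (Int × Int))) (v : Int) : List (Int × Int) :=
  (PySem.Dict.get? (PySem.Dict.mk G) v).getD []

-- visited[i] read / write.  Exact for 0 ≤ i < len — the only indices Pre_bfs admits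
-- (Python would wrap a negative index and raise IndexError out of range).
def visGet (vis : List Bool) (i : Int) : Bool :=
  if 0 ≤ i then vis.getD i.toNat true else true

def visSet (vis : List Bool) (i : Int) : List Bool :=
  if 0 ≤ i then vis.set i.toNat true else vis

-- body of `for u, weight in G[v]: …` acting on the state (queue, visited)
def bfsStep (limit : Int) (st : List Int × List Bool) (e : Int × Int) : List Int × List Bool :=
  if e.2 * (-1) ≥ limit ∧ visGet st.2 e.1 = false then (st.1 ++ [e.1], visSet st.2 e.1) else st

-- termination helpers for the while loop: one inner for-loop never increases
-- queue length + 2 · (number of unvisited slots)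
theorem count_false_set (l : List Bool) (n : Nat) (h2 : l[n]? = some false) :
    (l.set n true).count false + 1 = l.count false := by
  induction l generalizing n with
  | nil => simp at h2
  | cons b t ih =>
    cases n with
    | zero =>
      simp only [List.getElem?_cons_zero, Option.some.injEq] at h2
      simp [List.set_cons_zero, h2]
    | succ m =>
      simp only [List.getElem?_cons_succ] at h2
      have := ih m h2
      simp [List.set_cons_succ, List.count_cons]
      omega

theorem visGet_false_elim {vis : List Bool} {i : Int} (h : visGet vis i = false) :
    0 ≤ i ∧ vis[i.toNat]? = some false := by
  unfold visGet at h
  split at h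
  · next h0 =>
    refine ⟨h0, ?_⟩
    rw [List.getD_eq_getElem?_getD] at h
    cases hx : vis[i.toNat]? with
    | none => rw [hx] at h; simp at h
    | some b => rw [hx] at h; simpa using h
  · simp at h

theorem visSet_count_false (vis : List Bool) (i : Int) (h : visGet vis i = false) :
    (visSet vis i).count false + 1 = vis.count false := by
  obtain ⟨h0, hv⟩ := visGet_false_elim h
  unfold visSet
  rw [if_pos h0]
  exact count_false_set vis i.toNat hv

theorem bfsStep_measure (limit : Int) (st : List Int × List Bool) (e : Int × Int) :
    (bfsStep limit st e).1.length + 2 * (bfsStep limit st e).2.count false ≤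
      st.1.length + 2 * st.2.count false := by
  unfold bfsStep
  split
  · next hcond =>
    have := visSet_count_false st.2 e.1 hcond.2
    simp only [List.length_append, List.length_cons, List.length_nil]
    omega
  · exact le_refl _

theorem foldl_bfsStep_measure (limit : Int) (l : List (Int × Int)) (st : List Int × List Bool) :
    (l.foldl (bfsStep limit) st).1.length + 2 * (l.foldl (bfsStep limit) st).2.count false ≤
      st.1.length + 2 * st.2.count false := by
  induction l generalizing st with
  | nil => simp
  | cons e t ih =>
    simp only [List.foldl_cons]
    exact le_trans (ih (bfsStep limit st e)) (bfsStep_measure limit st e)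

-- decreasing measure of one while-loop iteration (named so the termination proof stays small)
theorem bfsLoop_dec (G : List (Int × List (Int × Int))) (limit v : Int) (q : List Int)
    (vis : List Bool) :
    ((gAdj G v).foldl (bfsStep limit) (q, vis)).1.length +
        2 * ((gAdj G v).foldl (bfsStep limit) (q, vis)).2.count false <
      (v :: q).length + 2 * vis.count false := by
  have := foldl_bfsStep_measure limit (gAdj G v) (q, vis)
  simp only [List.length_cons] at *
  omega

-- the while loop, on the state (q, visited)
def bfsLoop (G : List (Int × List (Int × Int))) (limit : Int) : List Int → List Bool → Bool
  | [], _ => false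
  | v :: q, vis =>
    if v = 2 then true
    else
      bfsLoop G limit ((gAdj G v).foldl (bfsStep limit) (q, vis)).1
        ((gAdj G v).foldl (bfsStep limit) (q, vis)).2
termination_by q vis => q.length + 2 * vis.count false
decreasing_by
  exact bfsLoop_dec G limit v q vis

def bfs (G : List (Int × List (Int × Int))) (V : Int) (limit : Int) : Bool :=
  bfsLoop G limit [1] (visSet (List.replicate (V + 1).toNat false) 1)

-- ===== PORT B =====
-- Port of Source B: recursive dfs(v) over the same visited array (closure-mutated in Python,
-- threaded through the recursion here).  The subtype fact carried by dfsV/dfsL — 'visited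
-- flags only flip from False to True' — is what Lean needs for termination.

-- one marking step: needed by dfsOk_mark (termination of the port) and by the proofs below
theorem visGet_visSet_of_false {vis : List Bool} {u : Int} (h : visGet vis u = false) (x : Int) :
    visGet (visSet vis u) x = (decide (x = u) || visGet vis x) := by
  obtain ⟨h0, hv⟩ := visGet_false_elim h
  have hlen : u.toNat < vis.length := by
    by_contra hl
    rw [List.getElem?_eq_none (by omega)] at hv; simp at hv
  unfold visGet visSet
  rw [if_pos h0]
  by_cases hx : 0 ≤ x
  · rw [if_pos hx, if_pos hx]
    by_cases hxu : x = u
    · subst hxu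
      rw [List.getD_eq_getElem?_getD, List.getElem?_set_self hlen]
      simp
    · have hne : u.toNat ≠ x.toNat := by omega
      rw [List.getD_eq_getElem?_getD, List.getElem?_set, if_neg hne,
        ← List.getD_eq_getElem?_getD]
      simp [hxu]
  · rw [if_neg hx, if_neg hx]
    simp

def dfsOk (vis vis' : List Bool) : Prop :=
  vis'.count false ≤ vis.count false ∧ ∀ x, visGet vis x = true → visGet vis' x = true

theorem dfsOk_refl (vis : List Bool) : dfsOk vis vis := ⟨le_rfl, fun _ h => h⟩

theorem dfsOk_trans {a b c : List Bool} (h1 : dfsOk a b) (h2 : dfsOk b c) : dfsOk a c :=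
  ⟨le_trans h2.1 h1.1, fun x hx => h2.2 x (h1.2 x hx)⟩

theorem dfsOk_mark {vis : List Bool} {u : Int} (h : visGet vis u = false) :
    dfsOk vis (visSet vis u) :=
  ⟨by have := visSet_count_false vis u h; omega,
   fun x hx => by rw [visGet_visSet_of_false h x, hx]; simp⟩

-- decreasing measures of the recursion (named so the termination proofs stay small)
theorem dfs_dec1 {vis : List Bool} {u : Int} (h : visGet vis u = false) :
    (visSet vis u).count false < vis.count false := by
  have := visSet_count_false vis u h
  omega

theorem dfs_dec2 {vis vis' : List Bool} {u : Int} (h : visGet vis u = false)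
    (hle : vis'.count false ≤ (visSet vis u).count false) :
    vis'.count false < vis.count false := by
  have := visSet_count_false vis u h
  omega

mutual
  -- def dfs(v): if v == t: return True; for u, weight in G[v]: …
  def dfsV (G : List (Int × List (Int × Int))) (limit : Int) (v : Int) (vis : List Bool) :
      {r : Bool × List Bool // dfsOk vis r.2} :=
    if v = 2 then ⟨(true, vis), dfsOk_refl vis⟩
    else dfsL G limit (gAdj G v) vis
  termination_by (vis.count false, (gAdj G v).length + 1)
  decreasing_by
    exact Prod.Lex.right _ (Nat.lt_succ_self _)

  -- the for-loop over the (remaining) adjacency list l of the current vertex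
  def dfsL (G : List (Int × List (Int × Int))) (limit : Int) (l : List (Int × Int))
      (vis : List Bool) : {r : Bool × List Bool // dfsOk vis r.2} :=
    match l with
    | [] => ⟨(false, vis), dfsOk_refl vis⟩
    | (u, w) :: rest =>
      if hc : -w ≥ limit ∧ visGet vis u = false then
        -- visited[u] = True; if dfs(u): return True
        match dfsV G limit u (visSet vis u) with
        | ⟨(b, vis'), hok⟩ =>
          if b then ⟨(true, vis'), dfsOk_trans (dfsOk_mark hc.2) hok⟩
          else
            let r2 := dfsL G limit rest vis'
            ⟨r2.val, dfsOk_trans (dfsOk_trans (dfsOk_mark hc.2) hok) r2.property⟩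
      else dfsL G limit rest vis
  termination_by (vis.count false, l.length)
  decreasing_by
    · exact Prod.Lex.left _ _ (dfs_dec1 hc.2)
    · exact Prod.Lex.left _ _ (dfs_dec2 hc.2 hok.1)
    · exact Prod.Lex.right _ (Nat.lt_succ_self _)
end

def bfs_alt (G : List (Int × List (Int × Int))) (V : Int) (limit : Int) : Bool :=
  -- visited = [False]*(V+1); visited[1] = True; return dfs(s)
  (dfsV G limit 1 (visSet (List.replicate (V + 1).toNat false) 1)).val.1

-- ===== PRECONDITION & SPEC =====
-- The vertices the search can ever examine: the closure of {1} under admissible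
-- (-w ≥ limit) edges, never expanding the target t = 2 (neither program does).  This is a
-- plain reachability closure of the input graph (iterated once per possible new vertex),
-- not a re-run of either port: the ports search with visited flags and stop at t.
def keyIn (G : List (Int × List (Int × Int))) (v : Int) : Bool :=
  G.any (fun p => decide (p.1 = v))

-- all edges listed under key y (Python dicts cannot repeat a key, so this is G[y])
def adjEdges (G : List (Int × List (Int × Int))) (y : Int) : List (Int × Int) :=
  (G.filter (fun p => decide (p.1 = y))).flatMap (fun p => p.2)

def verts (G : List (Int × List (Int × Int))) : List Int :=
  G.flatMap (fun p => p.2.map (fun e => e.1))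

def addNew (S : List Int) (x : Int) : List Int := if x ∈ S then S else S ++ [x]

def reachStep (G : List (Int × List (Int × Int))) (limit : Int) (S : List Int) : List Int :=
  S.foldl (fun acc y =>
    if y = 2 then acc
    else ((adjEdges G y).filter (fun e => decide (-e.2 ≥ limit))).foldl
      (fun a e => addNew a e.1) acc) S

def reachIter (G : List (Int × List (Int × Int))) (limit : Int) : Nat → List Int → List Int
  | 0, S => S
  | n + 1, S => reachIter G limit n (reachStep G limit S)

def reachList (G : List (Int × List (Int × Int))) (limit : Int) : List Int :=
  reachIter G limit ((verts G).length + 1) [1]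

-- Pre_bfs excludes exactly the corners where traversal order decides what happens at a
-- malformed vertex id: inputs where A raises (V < 1, vertex 1 not a key of G, or an
-- admissible edge from a reachable vertex whose target is outside 0..V or — except the
-- target t = 2 — not a key of G, which A hits with IndexError/KeyError unless t is found
-- first), and inputs with an admissible negative target reachable from 1, where Python's
-- negative-index wraparound silently aliases another vertex's visited flag and BFS and DFS
-- order make either answer an accident; bad edges in the part of G unreachable from 1 are
-- admitted (neither program ever looks at them).
def Pre_bfs (G : List (Int × List (Int × Int))) (V : Int) (limit : Int) : Prop :=
  1 ≤ V ∧ keyIn G 1 = true ∧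
    ∀ y ∈ reachList G limit, y ≠ 2 → ∀ e ∈ adjEdges G y, -e.2 ≥ limit →
      0 ≤ e.1 ∧ e.1 ≤ V ∧ (e.1 = 2 ∨ keyIn G e.1 = true)

instance (G : List (Int × List (Int × Int))) (V : Int) (limit : Int) :
    Decidable (Pre_bfs G V limit) := by unfold Pre_bfs; infer_instance

def pvWitness_bfs : (List (Int × List (Int × Int))) × Int × Int :=
  ([(1, [(2, -5)]), (2, [])], 2, 1)

def Spec_bfs (G : List (Int × List (Int × Int))) (V : Int) (limit : Int) (out : Bool) : Prop :=
  out = bfs_alt G V limit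

instance (G : List (Int × List (Int × Int))) (V : Int) (limit : Int) (out : Bool) :
    Decidable (Spec_bfs G V limit out) := by unfold Spec_bfs; infer_instance

-- ===== CLAIM (what is proved, stated in full; the proofs are below) =====
def Claim_equal_bfs : Prop := ∀ (G : List (Int × List (Int × Int))) (V : Int) (limit : Int),
  Dom_bfs G V limit → Pre_bfs G V limit → Spec_bfs G V limit (bfs G V limit)

-- ===== LEMMAS AND PROOFS =====

-- Vertices reachable from src by admissible (-w ≥ limit) edges that step only to vertices
-- still unvisited in the INITIAL array (unvis) and are never expanded out of t = 2.  Both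
-- ports return true exactly when 2 is reachable in this sense from 1.
inductive RDp (G : List (Int × List (Int × Int))) (limit : Int) (unvis : Int → Prop)
    (src : Int) : Int → Prop
  | refl : RDp G limit unvis src src
  | step {y u w : Int} : RDp G limit unvis src y → y ≠ 2 → (u, w) ∈ gAdj G y →
      -w ≥ limit → unvis u → RDp G limit unvis src u

theorem RDp_mono {G limit} {p q : Int → Prop} (h : ∀ x, p x → q x) {s x : Int}
    (hr : RDp G limit p s x) : RDp G limit q s x := by
  induction hr with
  | refl => exact .refl
  | step hy hne he hw hu ih => exact .step ih hne he hw (h _ hu)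

theorem RDp_trans {G limit} {p : Int → Prop} {s y x : Int}
    (h1 : RDp G limit p s y) (h2 : RDp G limit p y x) : RDp G limit p s x := by
  induction h2 with
  | refl => exact h1
  | step hy hne he hw hu ih => exact .step ih hne he hw hu

-- ---- A side ----

theorem foldl_bfsStep_spec (limit : Int) :
    ∀ (l : List (Int × Int)) (st : List Int × List Bool),
    (∀ x ∈ st.1, visGet st.2 x = true) →
    (∀ x ∈ st.1, x ∈ (l.foldl (bfsStep limit) st).1) ∧
    (∀ x, visGet (l.foldl (bfsStep limit) st).2 x = true ↔
      (visGet st.2 x = true ∨ x ∈ (l.foldl (bfsStep limit) st).1)) ∧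
    (∀ e ∈ l, -e.2 ≥ limit → visGet (l.foldl (bfsStep limit) st).2 e.1 = true) ∧
    (∀ x ∈ (l.foldl (bfsStep limit) st).1,
      x ∈ st.1 ∨ ∃ w, (x, w) ∈ l ∧ -w ≥ limit ∧ visGet st.2 x = false) := by
  intro l
  induction l with
  | nil =>
    intro st H
    refine ⟨fun x hx => hx, fun x => ⟨fun h => Or.inl h, ?_⟩, by simp, fun x hx => Or.inl hx⟩
    rintro (h | h)
    · exact h
    · exact H x h
  | cons e t ih =>
    intro st H
    simp only [List.foldl_cons]
    by_cases hcond : e.2 * (-1) ≥ limit ∧ visGet st.2 e.1 = false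
    · have hst' : bfsStep limit st e = (st.1 ++ [e.1], visSet st.2 e.1) := by
        unfold bfsStep; rw [if_pos hcond]
      have hadm : -e.2 ≥ limit := by have := hcond.1; omega
      have hget := visGet_visSet_of_false hcond.2
      have H' : ∀ x ∈ (st.1 ++ [e.1], visSet st.2 e.1).1,
          visGet (st.1 ++ [e.1], visSet st.2 e.1).2 x = true := by
        intro x hx
        rcases List.mem_append.1 hx with hx | hx
        · rw [hget x, H x hx]; simp
        · rw [List.mem_singleton] at hx
          rw [hx, hget e.1]; simp
      obtain ⟨ih1, ih2, ih3, ih4⟩ := ih _ H'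
      rw [hst']
      refine ⟨?_, ?_, ?_, ?_⟩
      · exact fun x hx => ih1 x (List.mem_append_left _ hx)
      · intro x
        rw [ih2 x, hget x]
        constructor
        · rintro (h | h)
          · rcases Bool.or_eq_true_iff.1 h with h | h
            · have hx : x = e.1 := by simpa using h
              exact Or.inr (by rw [hx]; exact ih1 e.1 (List.mem_append_right _ (List.mem_singleton_self _)))
            · exact Or.inl h
          · exact Or.inr h
        · rintro (h | h)
          · exact Or.inl (by rw [h]; simp)
          · exact Or.inr h
      · intro e' he' ha
        rcases List.mem_cons.1 he' with he' | he'
        · subst he'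
          exact (ih2 e'.1).2 (Or.inl (by rw [hget e'.1]; simp))
        · exact ih3 e' he' ha
      · intro x hx
        rcases ih4 x hx with h | ⟨w, hw, hwadm, hwf⟩
        · rcases List.mem_append.1 h with h | h
          · exact Or.inl h
          · rw [List.mem_singleton] at h
            subst h
            exact Or.inr ⟨e.2, List.mem_cons_self .., hadm, hcond.2⟩
        · rw [hget x] at hwf
          rcases Bool.or_eq_false_iff.1 hwf with ⟨h1, h2⟩
          exact Or.inr ⟨w, List.mem_cons_of_mem _ hw, hwadm, h2⟩
    · have hst' : bfsStep limit st e = st := by unfold bfsStep; rw [if_neg hcond]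
      obtain ⟨ih1, ih2, ih3, ih4⟩ := ih st H
      rw [hst']
      refine ⟨ih1, ih2, ?_, ?_⟩
      · intro e' he' ha
        rcases List.mem_cons.1 he' with he' | he'
        · subst he'
          have : visGet st.2 e'.1 = true := by
            rcases Bool.eq_false_or_eq_true (visGet st.2 e'.1) with h | h
            · exact h
            · exact absurd ⟨by omega, h⟩ hcond
          exact (ih2 e'.1).2 (Or.inl this)
        · exact ih3 e' he' ha
      · intro x hx
        rcases ih4 x hx with h | ⟨w, hw, hwadm, hwf⟩
        · exact Or.inl h
        · exact Or.inr ⟨w, List.mem_cons_of_mem _ hw, hwadm, hwf⟩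

theorem exchange_fwd {G : List (Int × List (Int × Int))} {limit : Int} {v : Int}
    {q' Q2 : List Int} {vis vis2 : List Bool}
    (S1 : ∀ x ∈ q', x ∈ Q2)
    (S2 : ∀ x, visGet vis2 x = true ↔ (visGet vis x = true ∨ x ∈ Q2))
    (S3 : ∀ e ∈ gAdj G v, -e.2 ≥ limit → visGet vis2 e.1 = true) :
    ∀ v₀ ∈ v :: q', ∀ x, RDp G limit (fun y => visGet vis y = false) v₀ x →
      x = v₀ ∨ ∃ v₁ ∈ Q2, RDp G limit (fun y => visGet vis2 y = false) v₁ x := by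
  intro v₀ hv₀ x hder
  induction hder with
  | refl => exact Or.inl rfl
  | @step y u w hy hne he hw hu ih =>
    have hmove : visGet vis2 u = true → u ∈ Q2 := by
      intro ht
      rcases (S2 u).1 ht with h | h
      · rw [hu] at h; cases h
      · exact h
    rcases ih with h | ⟨v₁, hv₁, hder₁⟩
    · subst h
      rcases List.mem_cons.1 hv₀ with h0 | h0
      · subst h0
        have := S3 (u, w) he hw
        exact Or.inr ⟨u, hmove this, RDp.refl⟩
      · rcases Bool.eq_false_or_eq_true (visGet vis2 u) with hb | hb
        · exact Or.inr ⟨u, hmove hb, RDp.refl⟩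
        · exact Or.inr ⟨y, S1 y h0, RDp.step RDp.refl hne he hw hb⟩
    · rcases Bool.eq_false_or_eq_true (visGet vis2 u) with hb | hb
      · exact Or.inr ⟨u, hmove hb, RDp.refl⟩
      · exact Or.inr ⟨v₁, hv₁, RDp.step hder₁ hne he hw hb⟩

theorem exchange_bwd {G : List (Int × List (Int × Int))} {limit : Int} {v : Int}
    {q' Q2 : List Int} {vis vis2 : List Bool} (hv : v ≠ 2)
    (S2 : ∀ x, visGet vis2 x = true ↔ (visGet vis x = true ∨ x ∈ Q2))
    (S4 : ∀ x ∈ Q2, x ∈ q' ∨ ∃ w, (x, w) ∈ gAdj G v ∧ -w ≥ limit ∧ visGet vis x = false) :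
    ∀ v₁ ∈ Q2, ∀ x, RDp G limit (fun y => visGet vis2 y = false) v₁ x →
      ∃ v₀ ∈ v :: q', RDp G limit (fun y => visGet vis y = false) v₀ x := by
  intro v₁ hv₁ x hder
  induction hder with
  | refl =>
    rcases S4 v₁ hv₁ with h | ⟨w, he, hw, hf⟩
    · exact ⟨v₁, List.mem_cons_of_mem _ h, RDp.refl⟩
    · exact ⟨v, List.mem_cons_self .., RDp.step RDp.refl hv he hw hf⟩
  | @step y u w hy hne he hw hu ih =>
    have hu' : visGet vis u = false := by
      rcases Bool.eq_false_or_eq_true (visGet vis u) with hb | hb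
      · rw [(S2 u).2 (Or.inl hb)] at hu; cases hu
      · exact hb
    obtain ⟨v₀, hm, hder₀⟩ := ih
    exact ⟨v₀, hm, RDp.step hder₀ hne he hw hu'⟩

theorem bfsLoop_iff (G : List (Int × List (Int × Int))) (limit : Int) :
    ∀ q vis, (∀ x ∈ q, visGet vis x = true) →
      (bfsLoop G limit q vis = true ↔
        ∃ v ∈ q, RDp G limit (fun x => visGet vis x = false) v 2) := by
  intro q vis
  induction q, vis using bfsLoop.induct G limit with
  | case1 vis =>
    intro _
    simp [bfsLoop]
  | case2 q vis =>
    intro _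
    constructor
    · intro _; exact ⟨2, List.mem_cons_self .., RDp.refl⟩
    · intro _; rw [bfsLoop, if_pos rfl]
  | case3 v q vis hv ih =>
    intro H
    obtain ⟨S1, S2, S3, S4⟩ := foldl_bfsStep_spec limit (gAdj G v) (q, vis)
      (fun x hx => H x (List.mem_cons_of_mem _ hx))
    have H' : ∀ x ∈ ((gAdj G v).foldl (bfsStep limit) (q, vis)).1,
        visGet ((gAdj G v).foldl (bfsStep limit) (q, vis)).2 x = true :=
      fun x hx => (S2 x).2 (Or.inr hx)
    rw [bfsLoop, if_neg hv]
    rw [ih H']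
    constructor
    · rintro ⟨v₁, hv₁, hder⟩
      exact exchange_bwd hv S2 S4 v₁ hv₁ 2 hder
    · rintro ⟨v₀, hv₀, hder⟩
      rcases exchange_fwd S1 S2 S3 v₀ hv₀ 2 hder with h | ⟨v₁, hv₁, hder₁⟩
      · subst h
        rcases List.mem_cons.1 hv₀ with h0 | h0
        · exact absurd h0.symm hv
        · exact ⟨2, S1 2 h0, RDp.refl⟩
      · exact ⟨v₁, hv₁, hder₁⟩

-- the initial array marks the source 1 visited (out-of-range reads default to true)
theorem visGet_init_one (V : Int) :
    visGet (visSet (List.replicate (V + 1).toNat false) 1) 1 = true := by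
  unfold visGet visSet
  rw [if_pos (by omega : (0:Int) ≤ 1), if_pos (by omega : (0:Int) ≤ 1)]
  by_cases hl : (1:Nat) < (V + 1).toNat
  · rw [List.getD_eq_getElem?_getD, List.getElem?_set_self (by simpa using hl)]
    simp
  · rw [List.getD_eq_getElem?_getD, List.getElem?_eq_none (by simp; omega)]
    simp

theorem bfs_iff (G : List (Int × List (Int × Int))) (V limit : Int) :
    (bfs G V limit = true ↔
      RDp G limit
        (fun x => visGet (visSet (List.replicate (V + 1).toNat false) 1) x = false) 1 2) := by
  have H : ∀ x ∈ [(1 : Int)],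
      visGet (visSet (List.replicate (V + 1).toNat false) 1) x = true := by
    intro x hx
    rw [List.mem_singleton] at hx
    rw [hx]
    exact visGet_init_one V
  rw [bfs, bfsLoop_iff G limit [1] _ H]
  constructor
  · rintro ⟨v, hv, hder⟩
    rw [List.mem_singleton] at hv
    rwa [hv] at hder
  · intro hder
    exact ⟨1, List.mem_singleton_self _, hder⟩

-- ---- B side ----

-- unfolding equations of the mutual well-founded definition
theorem dfsL_nil (G : List (Int × List (Int × Int))) (limit : Int) (vis : List Bool) :
    (dfsL G limit [] vis).val = (false, vis) := by
  rw [dfsL]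

theorem dfsL_cons_true {G : List (Int × List (Int × Int))} {limit u w : Int}
    {rest : List (Int × Int)} {vis : List Bool}
    (hc : -w ≥ limit ∧ visGet vis u = false)
    (hb : (dfsV G limit u (visSet vis u)).val.1 = true) :
    (dfsL G limit ((u, w) :: rest) vis).val =
      (true, (dfsV G limit u (visSet vis u)).val.2) := by
  rw [dfsL]
  simp only [dif_pos hc, hb, if_true]

theorem dfsL_cons_false {G : List (Int × List (Int × Int))} {limit u w : Int}
    {rest : List (Int × Int)} {vis : List Bool}
    (hc : -w ≥ limit ∧ visGet vis u = false)
    (hb : (dfsV G limit u (visSet vis u)).val.1 = false) :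
    (dfsL G limit ((u, w) :: rest) vis).val =
      (dfsL G limit rest (dfsV G limit u (visSet vis u)).val.2).val := by
  rw [dfsL]
  simp only [dif_pos hc, hb, if_false, Bool.false_eq_true]

theorem dfsL_cons_skip {G : List (Int × List (Int × Int))} {limit u w : Int}
    {rest : List (Int × Int)} {vis : List Bool} (hc : ¬(-w ≥ limit ∧ visGet vis u = false)) :
    (dfsL G limit ((u, w) :: rest) vis).val = (dfsL G limit rest vis).val := by
  rw [dfsL]
  simp only [dif_neg hc]

theorem dfsV_t (G : List (Int × List (Int × Int))) (limit : Int) (vis : List Bool) :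
    (dfsV G limit 2 vis).val = (true, vis) := by
  rw [dfsV]
  simp

theorem dfsV_ne {G : List (Int × List (Int × Int))} {limit v : Int} (vis : List Bool)
    (h : v ≠ 2) : dfsV G limit v vis = dfsL G limit (gAdj G v) vis := by
  rw [dfsV, if_neg h]

theorem dfs_spec (G : List (Int × List (Int × Int))) (limit : Int) : ∀ n : Nat,
    (∀ (l : List (Int × Int)) (vis : List Bool), vis.count false ≤ n →
      ((dfsL G limit l vis).val.1 = true →
        ∃ u w, (u, w) ∈ l ∧ -w ≥ limit ∧ visGet vis u = false ∧
          RDp G limit (fun x => visGet vis x = false) u 2) ∧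
      ((dfsL G limit l vis).val.1 = false →
        (∀ e ∈ l, -e.2 ≥ limit → visGet (dfsL G limit l vis).val.2 e.1 = true) ∧
        (∀ y, visGet (dfsL G limit l vis).val.2 y = true → visGet vis y = false →
          ∀ e ∈ gAdj G y, -e.2 ≥ limit → visGet (dfsL G limit l vis).val.2 e.1 = true) ∧
        (visGet (dfsL G limit l vis).val.2 2 = true → visGet vis 2 = true))) ∧
    (∀ (v : Int) (vis : List Bool), vis.count false ≤ n →
      ((dfsV G limit v vis).val.1 = true →
        RDp G limit (fun x => visGet vis x = false) v 2) ∧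
      ((dfsV G limit v vis).val.1 = false →
        (∀ e ∈ gAdj G v, -e.2 ≥ limit → visGet (dfsV G limit v vis).val.2 e.1 = true) ∧
        (∀ y, visGet (dfsV G limit v vis).val.2 y = true → visGet vis y = false →
          ∀ e ∈ gAdj G y, -e.2 ≥ limit → visGet (dfsV G limit v vis).val.2 e.1 = true) ∧
        (visGet (dfsV G limit v vis).val.2 2 = true → visGet vis 2 = true))) := by
  intro n
  induction n using Nat.strong_induction_on with
  | _ n IH =>
  have hDL : ∀ (l : List (Int × Int)) (vis : List Bool), vis.count false ≤ n →
      ((dfsL G limit l vis).val.1 = true →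
        ∃ u w, (u, w) ∈ l ∧ -w ≥ limit ∧ visGet vis u = false ∧
          RDp G limit (fun x => visGet vis x = false) u 2) ∧
      ((dfsL G limit l vis).val.1 = false →
        (∀ e ∈ l, -e.2 ≥ limit → visGet (dfsL G limit l vis).val.2 e.1 = true) ∧
        (∀ y, visGet (dfsL G limit l vis).val.2 y = true → visGet vis y = false →
          ∀ e ∈ gAdj G y, -e.2 ≥ limit → visGet (dfsL G limit l vis).val.2 e.1 = true) ∧
        (visGet (dfsL G limit l vis).val.2 2 = true → visGet vis 2 = true)) := by
    intro l
    induction l with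
    | nil =>
      intro vis hn
      constructor
      · intro ht
        rw [dfsL_nil] at ht
        cases ht
      · intro _
        refine ⟨by simp, ?_, ?_⟩
        · intro y hy hny
          rw [dfsL_nil] at hy
          rw [hny] at hy
          cases hy
        · intro h
          rw [dfsL_nil] at h
          exact h
    | cons e rest ihl =>
      obtain ⟨u, w⟩ := e
      intro vis hn
      by_cases hc : -w ≥ limit ∧ visGet vis u = false
      · have hcount : (visSet vis u).count false + 1 = vis.count false :=
          visSet_count_false vis u hc.2
        have hget := visGet_visSet_of_false hc.2
        have hlt : (visSet vis u).count false < n := by omega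
        have hDV_r := (IH ((visSet vis u).count false) hlt).2 u (visSet vis u) le_rfl
        cases hb : (dfsV G limit u (visSet vis u)).val.1
        · -- dfs(u) returned False: continue with the rest of the list
          have hprop := (dfsV G limit u (visSet vis u)).property
          have hlt2 : (dfsV G limit u (visSet vis u)).val.2.count false < n := by
            have := hprop.1
            omega
          have hDL_r2 := (IH ((dfsV G limit u (visSet vis u)).val.2.count false) hlt2).1
            rest (dfsV G limit u (visSet vis u)).val.2 le_rfl
          obtain ⟨hDV_a, hDV_b, hDV_c⟩ := hDV_r.2 hb
          constructor
          · intro ht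
            rw [dfsL_cons_false hc hb] at ht
            obtain ⟨u', w', hm', hw', hnu', hder'⟩ := hDL_r2.1 ht
            have hmono : ∀ x, visGet vis x = true →
                visGet (dfsV G limit u (visSet vis u)).val.2 x = true :=
              fun x hx => hprop.2 x (by rw [hget x, hx]; simp)
            have hnu'' : visGet vis u' = false := by
              cases h : visGet vis u' with
              | false => rfl
              | true => rw [hmono u' h] at hnu'; cases hnu'
            refine ⟨u', w', List.mem_cons_of_mem _ hm', hw', hnu'', ?_⟩
            refine RDp_mono ?_ hder'
            intro x hx
            cases h : visGet vis x with
            | false => rfl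
            | true => rw [hmono x h] at hx; cases hx
          · intro hf
            rw [dfsL_cons_false hc hb] at hf ⊢
            obtain ⟨ha2, hb2, hc2⟩ := hDL_r2.2 hf
            have hmono2 : ∀ x, visGet (dfsV G limit u (visSet vis u)).val.2 x = true →
                visGet (dfsL G limit rest (dfsV G limit u (visSet vis u)).val.2).val.2 x
                  = true :=
              fun x hx => (dfsL G limit rest _).property.2 x hx
            refine ⟨?_, ?_, ?_⟩
            · intro e he hwadm
              rcases List.mem_cons.1 he with he | he
              · subst he
                exact hmono2 _ (hprop.2 _ (by rw [hget]; simp))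
              · exact ha2 e he hwadm
            · intro y hy hny e he hwadm
              cases hyr : visGet (dfsV G limit u (visSet vis u)).val.2 y
              · exact hb2 y hy hyr e he hwadm
              · -- y was already marked when the rest-call started: y = u or marked in dfs(u)
                by_cases hyu : y = u
                · subst hyu
                  exact hmono2 _ (hDV_a e he hwadm)
                · have hny' : visGet (visSet vis u) y = false := by
                    rw [hget y, hny]
                    simp [hyu]
                  exact hmono2 _ (hDV_b y hyr hny' e he hwadm)
            · intro h2
              have h2' := hc2 h2
              have h2'' := hDV_c h2'
              rw [hget 2] at h2''
              rcases Bool.or_eq_true_iff.1 h2'' with h | h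
              · exfalso
                have h2u : (2 : Int) = u := by simpa using h
                rw [← h2u, dfsV_t] at hb
                cases hb
              · exact h
        · -- dfs(u) returned True
          constructor
          · intro _
            refine ⟨u, w, List.mem_cons_self .., hc.1, hc.2, ?_⟩
            refine RDp_mono ?_ (hDV_r.1 hb)
            intro x hx
            cases h : visGet vis x with
            | false => rfl
            | true =>
              exfalso
              rw [hget x, h] at hx
              simp at hx
          · intro hf
            rw [dfsL_cons_true hc hb] at hf
            cases hf
      · -- edge skipped (inadmissible or u already visited)
        have ihl' := ihl vis hn
        constructor
        · intro ht
          rw [dfsL_cons_skip hc] at ht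
          obtain ⟨u', w', hm', hw', hnu', hder'⟩ := ihl'.1 ht
          exact ⟨u', w', List.mem_cons_of_mem _ hm', hw', hnu', hder'⟩
        · intro hf
          rw [dfsL_cons_skip hc] at hf ⊢
          obtain ⟨ha2, hb2, hc2⟩ := ihl'.2 hf
          refine ⟨?_, hb2, hc2⟩
          intro e he hwadm
          rcases List.mem_cons.1 he with he | he
          · rw [he] at hwadm ⊢
            have hu_vis : visGet vis u = true := by
              cases h : visGet vis u with
              | false => exact absurd ⟨hwadm, h⟩ hc
              | true => rfl
            exact (dfsL G limit rest vis).property.2 _ hu_vis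
          · exact ha2 e he hwadm
  refine ⟨hDL, ?_⟩
  intro v vis hn
  by_cases hv : v = 2
  · subst hv
    constructor
    · intro _
      exact RDp.refl
    · intro hf
      rw [dfsV_t] at hf
      cases hf
  · have h := hDL (gAdj G v) vis hn
    constructor
    · intro ht
      rw [dfsV_ne vis hv] at ht
      obtain ⟨u, w, hm2, hw, hnu, hder⟩ := h.1 ht
      exact RDp_trans (RDp.step RDp.refl hv hm2 hw hnu) hder
    · intro hf
      rw [dfsV_ne vis hv] at hf ⊢
      exact h.2 hf

theorem bfs_alt_iff (G : List (Int × List (Int × Int))) (V limit : Int) :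
    (bfs_alt G V limit = true ↔
      RDp G limit
        (fun x => visGet (visSet (List.replicate (V + 1).toNat false) 1) x = false) 1 2) := by
  have hspec := (dfs_spec G limit
      ((visSet (List.replicate (V + 1).toNat false) 1).count false)).2
    1 (visSet (List.replicate (V + 1).toNat false) 1) le_rfl
  have hone := visGet_init_one V
  show (dfsV G limit 1 (visSet (List.replicate (V + 1).toNat false) 1)).val.1 = true ↔ _
  constructor
  · intro ht
    exact hspec.1 ht
  · intro hder
    cases hb : (dfsV G limit 1 (visSet (List.replicate (V + 1).toNat false) 1)).val.1 with
    | true => rfl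
    | false =>
      exfalso
      obtain ⟨ha, hbb, hcc⟩ := hspec.2 hb
      -- every vertex derivable from 1 is 1 itself or got marked by the finished search
      have habsorb : ∀ x,
          RDp G limit
            (fun y => visGet (visSet (List.replicate (V + 1).toNat false) 1) y = false) 1 x →
          x = 1 ∨ (visGet (visSet (List.replicate (V + 1).toNat false) 1) x = false ∧
            visGet (dfsV G limit 1
              (visSet (List.replicate (V + 1).toNat false) 1)).val.2 x = true) := by
        intro x hd
        induction hd with
        | refl => exact Or.inl rfl
        | @step y u w hy hne2 he hw hu ih =>
          refine Or.inr ⟨hu, ?_⟩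
          rcases ih with h1 | ⟨hy0, hyres⟩
          · rw [h1] at he
            exact ha (u, w) he hw
          · exact hbb y hyres hy0 (u, w) he hw
      rcases habsorb 2 hder with h | ⟨h0, hres⟩
      · exact absurd h (by norm_num)
      · rw [hcc hres] at h0
        cases h0

-- ===== VERDICT (by name: the statement is the Claim_ definition above) =====
theorem bfs_spec : Claim_equal_bfs := by
  intro G V limit _ _
  show bfs G V limit = bfs_alt G V limit
  have h1 := bfs_iff G V limit
  have h2 := bfs_alt_iff G V limit
  cases hA : bfs G V limit <;> cases hB : bfs_alt G V limit <;> simp_all
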